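-- pv_equiv track=rewrite | github.com/BrianLegacy/Accent_Detector | app.py | analyze_accent
-- ===== SOURCE A (Python) =====
-- def analyze_accent(text):
--     if any(word in text.lower() for word in ["gonna", "gotta", "wanna", "dude", "kinda"]):
--         return "American", 85
--     elif any(word in text.lower() for word in ["mate", "bloody", "flat", "trousers"]):
--         return "British", 80
--     elif any(word in text.lower() for word in ["reckon", "heaps", "brekkie"]):
--         return "Australian", 75
--     else:
--         return "English (Unclear origin)", 60
-- ===== SOURCE B (Python) =====
-- KEYWORD_SCORES = {
--     "gonna": ("American", 85), "gotta": ("American", 85), "wanna": ("American", 85),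
--     "dude": ("American", 85), "kinda": ("American", 85),
--     "mate": ("British", 80), "bloody": ("British", 80), "flat": ("British", 80),
--     "trousers": ("British", 80),
--     "reckon": ("Australian", 75), "heaps": ("Australian", 75), "brekkie": ("Australian", 75),
-- }
--
-- def analyze_accent(text):
--     low = text.lower()
--     best = ("English (Unclear origin)", 60)
--     for word, (label, score) in KEYWORD_SCORES.items():
--         if word in low and score > best[1]:
--             best = (label, score)
--     return best
-- ===== Notes on version B (the rewrite author's own statement) =====
-- stated objective: alternative
-- what changed: B flattens the branch rules into one keyword->(label,score) map and takes a max-reduction over all matched keywords (scores strictly encode A's branch priority), instead of A's short-circuiting if/elif chain that re-lowers the text per branch.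
import Mathlib
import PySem

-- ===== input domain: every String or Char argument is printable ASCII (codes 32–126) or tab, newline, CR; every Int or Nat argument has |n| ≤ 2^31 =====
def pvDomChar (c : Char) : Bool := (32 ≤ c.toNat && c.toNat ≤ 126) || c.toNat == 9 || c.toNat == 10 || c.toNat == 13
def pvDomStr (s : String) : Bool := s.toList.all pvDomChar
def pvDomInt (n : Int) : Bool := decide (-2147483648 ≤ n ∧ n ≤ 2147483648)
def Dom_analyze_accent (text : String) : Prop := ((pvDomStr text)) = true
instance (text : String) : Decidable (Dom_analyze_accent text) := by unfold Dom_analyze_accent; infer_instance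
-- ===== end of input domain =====

-- B replaces A's short-circuiting if/elif chain by a max-reduction over one flat keyword->(label,score) map (objective: alternative).


-- ===== PORT A =====
def analyze_accent (text : String) : String × Int :=
  if ["gonna", "gotta", "wanna", "dude", "kinda"].any
      (fun w => PySem.Str.isIn w (PySem.Str.lower text)) then ("American", 85)
  else if ["mate", "bloody", "flat", "trousers"].any
      (fun w => PySem.Str.isIn w (PySem.Str.lower text)) then ("British", 80)
  else if ["reckon", "heaps", "brekkie"].any
      (fun w => PySem.Str.isIn w (PySem.Str.lower text)) then ("Australian", 75)
  else ("English (Unclear origin)", 60)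

-- ===== PORT B =====
-- the keyword -> (label, score) dict of Source B, as an association list in insertion order
def accentKeywordScores : List (String × String × Int) :=
  [("gonna", "American", 85), ("gotta", "American", 85), ("wanna", "American", 85),
   ("dude", "American", 85), ("kinda", "American", 85),
   ("mate", "British", 80), ("bloody", "British", 80), ("flat", "British", 80),
   ("trousers", "British", 80),
   ("reckon", "Australian", 75), ("heaps", "Australian", 75), ("brekkie", "Australian", 75)]

-- one loop step of Source B: update best if the keyword matches and its score beats best
def accentStep (low : String) (best : String × Int) (e : String × String × Int) : String × Int :=
  if PySem.Str.isIn e.1 low && decide (e.2.2 > best.2) then (e.2.1, e.2.2) else best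

def analyze_accent_alt (text : String) : String × Int :=
  let low := PySem.Str.lower text
  accentKeywordScores.foldl (accentStep low) ("English (Unclear origin)", 60)

-- ===== PRECONDITION & SPEC =====
def Spec_analyze_accent (text : String) (out : String × Int) : Prop := out = analyze_accent_alt text
instance (text : String) (out : String × Int) : Decidable (Spec_analyze_accent text out) := by unfold Spec_analyze_accent; infer_instance

-- ===== CLAIM (what is proved, stated in full; the proofs are below) =====
def Claim_equal_analyze_accent : Prop := ∀ (text : String), Dom_analyze_accent text → Spec_analyze_accent text (analyze_accent text)

-- ===== LEMMAS AND PROOFS =====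

-- folding a group of keywords that all carry score s never changes a best whose score is ≥ s
theorem accent_fold_noup (low : String) (kws : List String) (label : String) (s : Int)
    (best : String × Int) (h : s ≤ best.2) :
    (kws.map (fun w => (w, label, s))).foldl (accentStep low) best = best := by
  induction kws with
  | nil => rfl
  | cons w kws ih =>
    simp only [List.map, List.foldl, accentStep]
    have : ¬ (s > best.2) := by omega
    simp [this, ih]

-- folding a group of keywords carrying score s over a best with smaller score yields the
-- group's entry iff some keyword of the group matches
theorem accent_fold_up (low : String) (kws : List String) (label : String) (s : Int)
    (best : String × Int) (h : best.2 < s) :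
    (kws.map (fun w => (w, label, s))).foldl (accentStep low) best =
      (if kws.any (fun w => PySem.Str.isIn w low) then (label, s) else best) := by
  induction kws with
  | nil => rfl
  | cons w kws ih =>
    simp only [List.map, List.foldl, List.any]
    by_cases hw : PySem.Str.isIn w low
    · simp only [PySem.Str.isIn_eq] at hw
      have hstep : accentStep low best (w, label, s) = (label, s) := by
        simp [accentStep, hw, h]
      rw [hstep, accent_fold_noup low kws label s (label, s) (le_refl s)]
      simp [hw]
    · simp only [PySem.Str.isIn_eq] at hw
      have hstep : accentStep low best (w, label, s) = best := by
        simp [accentStep, hw]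
      rw [hstep, ih]
      simp [hw]

-- ===== VERDICT (by name: the statement is the Claim_ definition above) =====
theorem analyze_accent_spec : Claim_equal_analyze_accent := by
  intro text _
  unfold Spec_analyze_accent analyze_accent analyze_accent_alt
  have hsplit : accentKeywordScores =
      (["gonna", "gotta", "wanna", "dude", "kinda"].map (fun w => (w, "American", (85 : Int)))) ++
      (["mate", "bloody", "flat", "trousers"].map (fun w => (w, "British", (80 : Int)))) ++
      (["reckon", "heaps", "brekkie"].map (fun w => (w, "Australian", (75 : Int)))) := rfl
  rw [hsplit, List.foldl_append, List.foldl_append]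
  set low := PySem.Str.lower text with hlow
  by_cases h1 : ["gonna", "gotta", "wanna", "dude", "kinda"].any (fun w => PySem.Str.isIn w low)
  · have e1 : (["gonna", "gotta", "wanna", "dude", "kinda"].map
        (fun w => (w, "American", (85 : Int)))).foldl (accentStep low)
        ("English (Unclear origin)", 60) = ("American", 85) := by
      rw [accent_fold_up low _ _ _ _ (by norm_num), if_pos h1]
    rw [e1, accent_fold_noup low _ "British" 80 ("American", 85) (by norm_num),
        accent_fold_noup low _ "Australian" 75 ("American", 85) (by norm_num)]
    simp_all
  · have e1 : (["gonna", "gotta", "wanna", "dude", "kinda"].map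
        (fun w => (w, "American", (85 : Int)))).foldl (accentStep low)
        ("English (Unclear origin)", 60) = ("English (Unclear origin)", 60) := by
      rw [accent_fold_up low _ _ _ _ (by norm_num), if_neg h1]
    rw [e1]
    by_cases h2 : ["mate", "bloody", "flat", "trousers"].any (fun w => PySem.Str.isIn w low)
    · have e2 : (["mate", "bloody", "flat", "trousers"].map
          (fun w => (w, "British", (80 : Int)))).foldl (accentStep low)
          ("English (Unclear origin)", 60) = ("British", 80) := by
        rw [accent_fold_up low _ _ _ _ (by norm_num), if_pos h2]
      rw [e2, accent_fold_noup low _ "Australian" 75 ("British", 80) (by norm_num)]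
      simp_all
    · have e2 : (["mate", "bloody", "flat", "trousers"].map
          (fun w => (w, "British", (80 : Int)))).foldl (accentStep low)
          ("English (Unclear origin)", 60) = ("English (Unclear origin)", 60) := by
        rw [accent_fold_up low _ _ _ _ (by norm_num), if_neg h2]
      rw [e2, accent_fold_up low _ "Australian" 75 ("English (Unclear origin)", 60) (by norm_num)]
      by_cases h3 : ["reckon", "heaps", "brekkie"].any (fun w => PySem.Str.isIn w low)
      · rw [if_pos h3]; simp_all
      · rw [if_neg h3]; simp_all
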